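-- pv_equiv track=rewrite | github.com/Projetos-PUC-Alunos/FPAA_TPF | guloso/Guloso.py | distribuir_rotas_guloso
-- ===== SOURCE A (Python) =====
-- def distribuir_rotas_guloso(rotas, num_caminhoes):
--
--     caminhoes = [[] for _ in range(num_caminhoes)]
--
--     for rota in rotas:
--         caminhao_mais_leve = min(caminhoes, key=sum)
--         caminhao_mais_leve.append(rota)
--
--     quilometragens = [sum(caminhao) for caminhao in caminhoes]
--     diferenca = max(quilometragens) - min(quilometragens)
--
--     return caminhoes, diferenca
-- ===== SOURCE B (Python) =====
-- def distribuir_rotas_guloso(rotas, num_caminhoes):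
--     # Min-heap of (carga, indice) pairs (hand-rolled: this module imports nothing).
--     # The heap root is the lexicographically least pair = least-loaded truck,
--     # lowest index on ties -- exactly min(caminhoes, key=sum)'s choice.
--     heap = [(0, t) for t in range(num_caminhoes)]   # already a valid heap
--     destino = []
--     for rota in rotas:
--         carga, j = heap[0]
--         destino.append(j)
--         # replace the root by the updated pair and sift it down
--         item = (carga + rota, j)
--         pos = 0
--         n = len(heap)
--         while True:
--             c = 2 * pos + 1
--             if c >= n:
--                 break
--             if c + 1 < n and heap[c + 1] < heap[c]:
--                 c += 1
--             if heap[c] < item: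
--                 heap[pos] = heap[c]
--                 pos = c
--             else:
--                 break
--         heap[pos] = item
--     # materialise the trucks from the recorded assignments
--     caminhoes = [[] for _ in range(num_caminhoes)]
--     for r, d in zip(rotas, destino):
--         caminhoes[d].append(r)
--     cargas = [0] * num_caminhoes
--     for carga, j in heap:
--         cargas[j] = carga
--     return caminhoes, max(cargas) - min(cargas)
-- ===== Notes on version B (the rewrite author's own statement) =====
-- stated objective: faster
-- what changed: Replaces A's per-route rescan that re-sums every truck (min(caminhoes, key=sum)) by a hand-rolled min-heap of (load, index) pairs: each route pops the root, records the assignment and sifts the updated pair down; the trucks are materialised by one final scatter pass over the recorded assignments and the imbalance comes straight from the load pairs.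
import Mathlib
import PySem

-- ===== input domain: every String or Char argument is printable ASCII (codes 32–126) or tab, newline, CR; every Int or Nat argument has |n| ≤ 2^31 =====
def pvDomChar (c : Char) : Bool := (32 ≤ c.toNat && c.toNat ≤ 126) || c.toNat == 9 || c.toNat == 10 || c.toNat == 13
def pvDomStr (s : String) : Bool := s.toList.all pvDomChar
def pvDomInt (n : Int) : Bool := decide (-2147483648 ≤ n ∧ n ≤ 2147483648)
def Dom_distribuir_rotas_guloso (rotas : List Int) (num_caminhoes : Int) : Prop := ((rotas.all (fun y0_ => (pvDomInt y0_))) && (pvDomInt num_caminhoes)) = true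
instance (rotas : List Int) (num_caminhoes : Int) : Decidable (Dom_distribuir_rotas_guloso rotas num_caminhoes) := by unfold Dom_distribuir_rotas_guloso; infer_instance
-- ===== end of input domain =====

-- B records assignments via a hand-rolled min-heap of (load, index) pairs and materialises the
-- trucks by a final scatter pass, instead of A's per-route rescan that re-sums every truck
-- (measured faster); proved equal to A for num_caminhoes >= 1.


-- ===== PORT A =====
-- Python sum(l) for a list of ints
def pySum (l : List Int) : Int := l.foldl (· + ·) 0

-- index of the FIRST minimal element (Python min's tie rule), scanning left to right
def argminAux (i bi : Nat) (bv : Int) : List Int → Nat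
  | [] => bi
  | x :: xs => if x < bv then argminAux (i+1) i x xs else argminAux (i+1) bi bv xs

def pyArgmin : List Int → Nat
  | [] => 0
  | x :: xs => argminAux 1 0 x xs

-- one iteration of A's loop: min(caminhoes, key=sum) then append (mutation ported as set)
def stepA (cs : List (List Int)) (rota : Int) : List (List Int) :=
  let j := pyArgmin (cs.map pySum)
  cs.set j ((cs.getD j []) ++ [rota])

def distribuir_rotas_guloso (rotas : List Int) (num_caminhoes : Int) : List (List Int) × Int :=
  let caminhoes0 := List.replicate num_caminhoes.toNat ([] : List Int)
  let caminhoes := rotas.foldl stepA caminhoes0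
  let quilometragens := caminhoes.map pySum
  (caminhoes,
    (PySem.List.max? quilometragens (fun x => x)).getD 0
      - (PySem.List.min? quilometragens (fun x => x)).getD 0)

-- ===== PORT B =====
-- Python's tuple comparison (carga, indice) < (carga', indice')
def lexLt (a b : Int × Nat) : Bool := a.1 < b.1 || (a.1 == b.1 && a.2 < b.2)

-- the child `c` the Python loop body picks (c = 2*pos+1, bumped to the smaller sibling)
def chooseChild (heap : List (Int × Nat)) (pos : Nat) : Nat :=
  let c0 := 2*pos+1
  if c0+1 < heap.length && lexLt (heap.getD (c0+1) (0,0)) (heap.getD c0 (0,0)) then c0+1 else c0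

lemma chooseChild_lb (heap : List (Int × Nat)) (pos : Nat) :
    2*pos+1 ≤ chooseChild heap pos ∧ chooseChild heap pos ≤ 2*pos+2 := by
  simp only [chooseChild]; split <;> omega

-- B's inner while loop: place `item` into the vacated position `pos`, sifting it down
def siftdown (heap : List (Int × Nat)) (item : Int × Nat) (pos : Nat) : List (Int × Nat) :=
  if _hc : 2*pos+1 < heap.length then
    let c := chooseChild heap pos
    if lexLt (heap.getD c (0,0)) item then
      siftdown (heap.set pos (heap.getD c (0,0))) item c
    else heap.set pos item
  else heap.set pos item
termination_by heap.length - pos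
decreasing_by
  have := chooseChild_lb heap pos
  simp only [List.length_set]
  omega

-- one iteration of B's main loop over (heap, destino)
def stepB (st : List (Int × Nat) × List Nat) (rota : Int) : List (Int × Nat) × List Nat :=
  let root := st.1.getD 0 (0, 0)
  (siftdown st.1 (root.1 + rota, root.2) 0, st.2 ++ [root.2])

def distribuir_rotas_guloso_alt (rotas : List Int) (num_caminhoes : Int) : List (List Int) × Int :=
  let k := num_caminhoes.toNat
  let heap0 := (List.range k).map (fun t => ((0 : Int), t))
  let st := rotas.foldl stepB (heap0, [])
  let destino := st.2
  let caminhoes := (rotas.zip destino).foldl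
      (fun cs p => cs.set p.2 (cs.getD p.2 [] ++ [p.1])) (List.replicate k ([] : List Int))
  let cargas := st.1.foldl (fun cg p => cg.set p.2 p.1) (List.replicate k (0 : Int))
  (caminhoes,
    (PySem.List.max? cargas (fun x => x)).getD 0
      - (PySem.List.min? cargas (fun x => x)).getD 0)

-- ===== PRECONDITION & SPEC =====
-- Pre_ excludes num_caminhoes < 1, where Python A raises ValueError (min()/max() of an empty sequence).
def Pre_distribuir_rotas_guloso (rotas : List Int) (num_caminhoes : Int) : Prop := 1 ≤ num_caminhoes
instance (rotas : List Int) (num_caminhoes : Int) : Decidable (Pre_distribuir_rotas_guloso rotas num_caminhoes) := by unfold Pre_distribuir_rotas_guloso; infer_instance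

def pvWitness_distribuir_rotas_guloso : List Int × Int := ([3, 1, 2, 5], 2)

def Spec_distribuir_rotas_guloso (rotas : List Int) (num_caminhoes : Int) (out : List (List Int) × Int) : Prop := out = distribuir_rotas_guloso_alt rotas num_caminhoes
instance (rotas : List Int) (num_caminhoes : Int) (out : List (List Int) × Int) : Decidable (Spec_distribuir_rotas_guloso rotas num_caminhoes out) := by unfold Spec_distribuir_rotas_guloso; infer_instance

-- ===== CLAIM (what is proved, stated in full; the proofs are below) =====
def Claim_equal_distribuir_rotas_guloso : Prop := ∀ (rotas : List Int) (num_caminhoes : Int), Dom_distribuir_rotas_guloso rotas num_caminhoes → Pre_distribuir_rotas_guloso rotas num_caminhoes → Spec_distribuir_rotas_guloso rotas num_caminhoes (distribuir_rotas_guloso rotas num_caminhoes)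

-- ===== LEMMAS AND PROOFS =====

-- ---- order facts ----
def pLe (a b : Int × Nat) : Prop := a.1 < b.1 ∨ (a.1 = b.1 ∧ a.2 ≤ b.2)

lemma lexLt_iff (a b : Int × Nat) : lexLt a b = true ↔ (a.1 < b.1 ∨ (a.1 = b.1 ∧ a.2 < b.2)) := by
  simp [lexLt]

lemma pLe_of_lexLt {a b : Int × Nat} (h : lexLt a b = true) : pLe a b := by
  rw [lexLt_iff] at h; unfold pLe; omega

lemma pLe_of_not_lexLt {a b : Int × Nat} (h : ¬ lexLt b a = true) : pLe a b := by
  rw [lexLt_iff] at h; unfold pLe; omega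

lemma pLe_refl (a : Int × Nat) : pLe a a := by unfold pLe; omega

lemma pLe_trans {a b c : Int × Nat} (h1 : pLe a b) (h2 : pLe b c) : pLe a c := by
  unfold pLe at *; omega

-- ---- getD/set/map plumbing ----
lemma getD_set_self {α : Type} [Inhabited α] (l : List α) (i : Nat) (a d : α) (h : i < l.length) :
    (l.set i a).getD i d = a := by
  simp [List.getD_eq_getElem?_getD, List.getElem?_set, h]

lemma getD_set_ne {α : Type} (l : List α) (i j : Nat) (a d : α) (h : i ≠ j) :
    (l.set i a).getD j d = l.getD j d := by
  simp [List.getD_eq_getElem?_getD, List.getElem?_set, h]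

lemma getD_map_pySum (cs : List (List Int)) (t : Nat) (h : t < cs.length) :
    (cs.map pySum).getD t 0 = pySum (cs.getD t []) := by
  rw [List.getD_eq_getElem _ _ (by simpa using h), List.getD_eq_getElem _ _ h, List.getElem_map]

lemma pySum_append (l : List Int) (r : Int) : pySum (l ++ [r]) = pySum l + r := by
  simp [pySum, List.foldl_append]

-- ---- A-side argmin facts ----
lemma argminAux_lt (N : Nat) : ∀ (l : List Int) (i bi : Nat) (bv : Int),
    bi < N → i + l.length ≤ N → argminAux i bi bv l < N := by
  intro l
  induction l with
  | nil => intro i bi bv h _; simpa [argminAux] using h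
  | cons x xs ih =>
    intro i bi bv h hlen
    simp only [argminAux]
    split
    · exact ih (i+1) i x (by simp at hlen; omega) (by simp at hlen; omega)
    · exact ih (i+1) bi bv h (by simp at hlen; omega)

lemma pyArgmin_lt (l : List Int) (h : l ≠ []) : pyArgmin l < l.length := by
  cases l with
  | nil => simp at h
  | cons x xs =>
    simp only [pyArgmin, List.length_cons]
    exact argminAux_lt (xs.length + 1) xs 1 0 x (by omega) (by omega)

-- the accumulator invariant of Python min's left-to-right scan
lemma argminAux_spec : ∀ (l : List Int) (i bi : Nat) (bv : Int), bi < i →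
    let r := argminAux i bi bv l
    let rv := if r = bi then bv else l.getD (r - i) 0
    (r = bi ∨ (i ≤ r ∧ r - i < l.length)) ∧
    (rv < bv ∨ (rv = bv ∧ r = bi)) ∧
    (∀ m, m < l.length → rv < l.getD m 0 ∨ (rv = l.getD m 0 ∧ r ≤ i + m)) := by
  intro l
  induction l with
  | nil => intro i bi bv _; simp [argminAux]
  | cons x xs ih =>
    intro i bi bv hbi
    simp only [argminAux]
    by_cases hx : x < bv
    · rw [if_pos hx]
      obtain ⟨hr, hrv, hm⟩ := ih (i+1) i x (by omega)
      set r := argminAux (i+1) i x xs with hrdef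
      have hrne : r ≠ bi := by omega
      rcases hr with h0 | h0
      · refine ⟨Or.inr ⟨by omega, by simp only [List.length_cons]; omega⟩, ?_, ?_⟩
        · rw [if_neg hrne]
          have hv : (x :: xs).getD (r - i) 0 = x := by rw [h0]; simp
          rw [hv]; exact Or.inl hx
        · intro m hmlt
          rw [if_neg hrne]
          have hv : (x :: xs).getD (r - i) 0 = x := by rw [h0]; simp
          rw [hv]
          cases m with
          | zero => exact Or.inr ⟨by simp, by omega⟩
          | succ m' =>
            simp only [List.getD_cons_succ]
            have h2 := hm m' (by simpa using hmlt)
            rw [if_pos h0] at h2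
            rcases h2 with h2 | h2
            · exact Or.inl h2
            · exact Or.inr ⟨h2.1, by omega⟩
      · have hri : r ≠ i := by omega
        have hstep : (x :: xs).getD (r - i) 0 = xs.getD (r - (i+1)) 0 := by
          obtain ⟨m0, hm0, hm1⟩ : ∃ m0, r - i = m0 + 1 ∧ r - (i+1) = m0 := ⟨r - (i+1), by omega, rfl⟩
          rw [hm0, hm1]; simp
        rw [if_neg hri] at hrv hm
        refine ⟨Or.inr ⟨by omega, by simp only [List.length_cons]; omega⟩, ?_, ?_⟩
        · rw [if_neg hrne, hstep]
          rcases hrv with hv | hv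
          · exact Or.inl (lt_trans hv hx)
          · exact absurd hv.2 hri
        · intro m hmlt
          rw [if_neg hrne, hstep]
          cases m with
          | zero =>
            simp only [List.getD_cons_zero]
            rcases hrv with hv | hv
            · exact Or.inl hv
            · exact absurd hv.2 hri
          | succ m' =>
            simp only [List.getD_cons_succ]
            have h2 := hm m' (by simpa using hmlt)
            rcases h2 with h2 | h2
            · exact Or.inl h2
            · exact Or.inr ⟨h2.1, by omega⟩
    · rw [if_neg hx]
      obtain ⟨hr, hrv, hm⟩ := ih (i+1) bi bv (by omega)
      set r := argminAux (i+1) bi bv xs with hrdef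
      rcases hr with h0 | h0
      · rw [if_pos h0] at hrv hm
        refine ⟨Or.inl h0, ?_, ?_⟩
        · rw [if_pos h0]; exact Or.inr ⟨rfl, h0⟩
        · intro m hmlt
          rw [if_pos h0]
          cases m with
          | zero =>
            simp only [List.getD_cons_zero]
            omega
          | succ m' =>
            simp only [List.getD_cons_succ]
            have h2 := hm m' (by simpa using hmlt)
            rcases h2 with h2 | h2
            · exact Or.inl h2
            · exact Or.inr ⟨h2.1, by omega⟩
      · have hri : r ≠ bi := by omega
        have hstep : (x :: xs).getD (r - i) 0 = xs.getD (r - (i+1)) 0 := by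
          obtain ⟨m0, hm0, hm1⟩ : ∃ m0, r - i = m0 + 1 ∧ r - (i+1) = m0 := ⟨r - (i+1), by omega, rfl⟩
          rw [hm0, hm1]; simp
        rw [if_neg hri] at hrv hm
        refine ⟨Or.inr ⟨by omega, by simp only [List.length_cons]; omega⟩, ?_, ?_⟩
        · rw [if_neg hri, hstep]
          rcases hrv with hv | hv
          · exact Or.inl hv
          · exact absurd hv.2 hri
        · intro m hmlt
          rw [if_neg hri, hstep]
          cases m with
          | zero =>
            simp only [List.getD_cons_zero]
            rcases hrv with hv | hv
            · exact Or.inl (lt_of_lt_of_le hv (not_lt.mp hx))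
            · exact absurd hv.2 hri
          | succ m' =>
            simp only [List.getD_cons_succ]
            have h2 := hm m' (by simpa using hmlt)
            rcases h2 with h2 | h2
            · exact Or.inl h2
            · exact Or.inr ⟨h2.1, by omega⟩

lemma pyArgmin_isMin (l : List Int) (h : l ≠ []) : ∀ t, t < l.length →
    l.getD (pyArgmin l) 0 < l.getD t 0 ∨
      (l.getD (pyArgmin l) 0 = l.getD t 0 ∧ pyArgmin l ≤ t) := by
  cases l with
  | nil => simp at h
  | cons x xs =>
    intro t ht
    simp only [pyArgmin]
    obtain ⟨hr, hrv, hm⟩ := argminAux_spec xs 1 0 x (by omega)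
    set r := argminAux 1 0 x xs with hrdef
    rcases hr with h0 | h0
    · have hv : (x :: xs).getD r 0 = x := by rw [h0]; simp
      rw [if_pos h0] at hm
      rw [hv]
      cases t with
      | zero => exact Or.inr ⟨by simp, by omega⟩
      | succ t' =>
        simp only [List.getD_cons_succ]
        have h2 := hm t' (by simpa using ht)
        rcases h2 with h2 | h2
        · exact Or.inl h2
        · exact Or.inr ⟨h2.1, by omega⟩
    · have hr0 : r ≠ 0 := by omega
      have hstep : (x :: xs).getD r 0 = xs.getD (r - 1) 0 := by
        obtain ⟨m0, hm0, hm1⟩ : ∃ m0, r = m0 + 1 ∧ r - 1 = m0 := ⟨r - 1, by omega, rfl⟩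
        rw [hm1, hm0]; simp
      rw [if_neg hr0] at hrv hm
      rw [hstep]
      cases t with
      | zero =>
        simp only [List.getD_cons_zero]
        have hre : r - 1 = r - (1+0) := rfl
        rcases hrv with hv | hv
        · exact Or.inl hv
        · exact absurd hv.2 hr0
      | succ t' =>
        simp only [List.getD_cons_succ]
        have h2 := hm t' (by simpa using ht)
        rcases h2 with h2 | h2
        · exact Or.inl h2
        · exact Or.inr ⟨h2.1, by omega⟩

lemma pyArgmin_eq_of (l : List Int) (j : Nat) (hl : l ≠ []) (hj : j < l.length)
    (hmin : ∀ t, t < l.length → l.getD j 0 < l.getD t 0 ∨ (l.getD j 0 = l.getD t 0 ∧ j ≤ t)) :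
    pyArgmin l = j := by
  have h1 := pyArgmin_isMin l hl j hj
  have h2 := hmin (pyArgmin l) (pyArgmin_lt l hl)
  omega

-- ---- heap facts ----
def IsHeap (h : List (Int × Nat)) : Prop :=
  ∀ i c, (c = 2*i+1 ∨ c = 2*i+2) → c < h.length → pLe (h.getD i (0,0)) (h.getD c (0,0))

lemma root_min {h : List (Int × Nat)} (hh : IsHeap h) :
    ∀ i, i < h.length → pLe (h.getD 0 (0,0)) (h.getD i (0,0)) := by
  intro i
  induction i using Nat.strong_induction_on with
  | _ i ih =>
    intro hi
    rcases Nat.eq_zero_or_pos i with h0 | h0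
    · subst h0; exact pLe_refl _
    · have hp : i = 2*((i-1)/2)+1 ∨ i = 2*((i-1)/2)+2 := by omega
      exact pLe_trans (ih ((i-1)/2) (by omega) (by omega)) (hh ((i-1)/2) i hp hi)

lemma chooseChild_lt (h : List (Int × Nat)) (pos : Nat) (hc : 2*pos+1 < h.length) :
    chooseChild h pos < h.length := by
  simp only [chooseChild]
  split
  · next hb =>
    simp only [Bool.and_eq_true, decide_eq_true_eq] at hb
    omega
  · omega

lemma chooseChild_min (h : List (Int × Nat)) (pos : Nat) (hc : 2*pos+1 < h.length) :
    pLe (h.getD (chooseChild h pos) (0,0)) (h.getD (2*pos+1) (0,0)) ∧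
    (2*pos+2 < h.length → pLe (h.getD (chooseChild h pos) (0,0)) (h.getD (2*pos+2) (0,0))) := by
  simp only [chooseChild]
  split
  · next hb =>
    simp only [Bool.and_eq_true, decide_eq_true_eq] at hb
    have h21 : 2*pos+1+1 = 2*pos+2 := by omega
    rw [h21] at hb ⊢
    exact ⟨pLe_of_lexLt hb.2, fun _ => pLe_refl _⟩
  · next hb =>
    simp only [Bool.and_eq_true, decide_eq_true_eq, not_and] at hb
    refine ⟨pLe_refl _, fun h2 => ?_⟩
    have := hb (by omega)
    have h21 : 2*pos+1+1 = 2*pos+2 := by omega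
    rw [h21] at this
    exact pLe_of_not_lexLt (by simpa using this)

lemma getD_cons_set_perm (d : Int × Nat) : ∀ (l : List (Int × Nat)) (j : Nat) (a : Int × Nat),
    j < l.length → (l.getD j d :: l.set j a).Perm (a :: l) := by
  intro l
  induction l with
  | nil => intro j a hj; simp at hj
  | cons y rest ih =>
    intro j a hj
    cases j with
    | zero => simpa using List.Perm.swap a y rest
    | succ j' =>
      simp only [List.getD_cons_succ, List.set_cons_succ]
      exact ((List.Perm.swap y (rest.getD j' d) (rest.set j' a)).trans
        (((ih j' a (by simpa using hj))).cons y)).trans (List.Perm.swap a y rest)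

lemma set_set_perm (d : Int × Nat) : ∀ (l : List (Int × Nat)) (i j : Nat) (a : Int × Nat),
    i < j → j < l.length → ((l.set i (l.getD j d)).set j a).Perm (l.set i a) := by
  intro l
  induction l with
  | nil => intro i j a _ hj; simp at hj
  | cons y rest ih =>
    intro i j a hij hj
    obtain ⟨j', rfl⟩ : ∃ j', j = j'+1 := ⟨j-1, by omega⟩
    cases i with
    | zero =>
      simp only [List.getD_cons_succ, List.set_cons_zero, List.set_cons_succ]
      exact getD_cons_set_perm d rest j' a (by simpa using hj)
    | succ i' =>
      simp only [List.getD_cons_succ, List.set_cons_succ]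
      exact (ih i' j' a (by omega) (by simpa using hj)).cons y

lemma siftdown_perm_aux : ∀ (n : Nat) (h : List (Int × Nat)) (item : Int × Nat) (pos : Nat),
    h.length - pos ≤ n → pos < h.length → (siftdown h item pos).Perm (h.set pos item) := by
  intro n
  induction n with
  | zero => intro h item pos hle hpos; omega
  | succ n ih =>
    intro h item pos hle hpos
    rw [siftdown]
    split
    · next hc =>
      simp only []
      split
      · next hlt =>
        have hcl := chooseChild_lt h pos hc
        have hcb := chooseChild_lb h pos
        refine (ih (h.set pos (h.getD (chooseChild h pos) (0,0))) item (chooseChild h pos)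
          (by simp only [List.length_set]; omega) (by simp only [List.length_set]; omega)).trans ?_
        exact set_set_perm (0,0) h pos (chooseChild h pos) item (by omega) hcl
      · exact List.Perm.refl _
    · exact List.Perm.refl _

lemma siftdown_perm (h : List (Int × Nat)) (item : Int × Nat) (pos : Nat)
    (hpos : pos < h.length) : (siftdown h item pos).Perm (h.set pos item) :=
  siftdown_perm_aux h.length h item pos (by omega) hpos

lemma siftdown_isHeap_aux : ∀ (n : Nat) (h : List (Int × Nat)) (item : Int × Nat) (pos : Nat),
    h.length - pos ≤ n → pos < h.length →
    (∀ i c, (c = 2*i+1 ∨ c = 2*i+2) → c < h.length → i ≠ pos → c ≠ pos →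
        pLe (h.getD i (0,0)) (h.getD c (0,0))) →
    (0 < pos → pLe (h.getD ((pos-1)/2) (0,0)) item) →
    (0 < pos → ∀ c, (c = 2*pos+1 ∨ c = 2*pos+2) → c < h.length →
        pLe (h.getD ((pos-1)/2) (0,0)) (h.getD c (0,0))) →
    IsHeap (siftdown h item pos) := by
  intro n
  induction n with
  | zero => intro h item pos hle hpos _ _ _; omega
  | succ n ihn =>
  intro h item pos hle hpos P1 P2 P3
  rw [siftdown]
  split
  · next hc =>
    simp only []
    have hcb := chooseChild_lb h pos
    have hcl := chooseChild_lt h pos hc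
    have hcmin := chooseChild_min h pos hc
    set c := chooseChild h pos with hcdef
    have hpc : pos ≠ c := by omega
    split
    · next hlt =>
      refine ihn _ item c (by simp only [List.length_set]; omega)
        (by simp only [List.length_set]; omega) ?_ ?_ ?_
      · intro i cc hrel hcc hip hccp
        rw [List.length_set] at hcc
        by_cases hipos : pos = i
        · subst hipos
          have e1 : (h.set pos (h.getD c (0,0))).getD pos (0,0) = h.getD c (0,0) :=
            getD_set_self _ _ _ _ hpos
          rw [e1, getD_set_ne _ _ _ _ _ (show pos ≠ cc by omega)]
          rcases hrel with rfl | rfl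
          · exact hcmin.1
          · exact hcmin.2 hcc
        · by_cases hccpos : pos = cc
          · subst hccpos
            have hpos0 : 0 < pos := by omega
            have hi : i = (pos-1)/2 := by omega
            have e1 : (h.set pos (h.getD c (0,0))).getD pos (0,0) = h.getD c (0,0) :=
              getD_set_self _ _ _ _ hpos
            rw [e1, getD_set_ne _ _ _ _ _ (show pos ≠ i by omega), hi]
            exact P3 hpos0 c (by omega) hcl
          · rw [getD_set_ne _ _ _ _ _ hipos,
                getD_set_ne _ _ _ _ _ hccpos]
            exact P1 i cc hrel hcc (fun e => hipos e.symm) (fun e => hccpos e.symm)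
      · intro hc0
        have hparent : (c-1)/2 = pos := by omega
        have e1 : (h.set pos (h.getD c (0,0))).getD pos (0,0) = h.getD c (0,0) :=
          getD_set_self _ _ _ _ hpos
        rw [hparent, e1]
        exact pLe_of_lexLt hlt
      · intro hc0 cc hrel hcc
        rw [List.length_set] at hcc
        have hparent : (c-1)/2 = pos := by omega
        have e1 : (h.set pos (h.getD c (0,0))).getD pos (0,0) = h.getD c (0,0) :=
          getD_set_self _ _ _ _ hpos
        rw [hparent, e1, getD_set_ne _ _ _ _ _ (show pos ≠ cc by omega)]
        exact P1 c cc hrel hcc (fun e => hpc e.symm) (by omega)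
    · next hnlt =>
      intro i cc hrel hcc
      rw [List.length_set] at hcc
      by_cases hipos : pos = i
      · subst hipos
        have e1 : (h.set pos item).getD pos (0,0) = item := getD_set_self _ _ _ _ hpos
        rw [e1, getD_set_ne _ _ _ _ _ (show pos ≠ cc by omega)]
        have hle1 : pLe item (h.getD c (0,0)) := pLe_of_not_lexLt hnlt
        rcases hrel with rfl | rfl
        · exact pLe_trans hle1 hcmin.1
        · exact pLe_trans hle1 (hcmin.2 hcc)
      · by_cases hccpos : pos = cc
        · subst hccpos
          have hpos0 : 0 < pos := by omega
          have hi : i = (pos-1)/2 := by omega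
          rw [getD_set_ne _ _ _ _ _ (show pos ≠ i by omega), getD_set_self _ _ _ _ hpos, hi]
          exact P2 hpos0
        · rw [getD_set_ne _ _ _ _ _ hipos,
              getD_set_ne _ _ _ _ _ hccpos]
          exact P1 i cc hrel hcc (fun e => hipos e.symm) (fun e => hccpos e.symm)
  · next hnc =>
    intro i cc hrel hcc
    rw [List.length_set] at hcc
    by_cases hipos : pos = i
    · exfalso; omega
    · by_cases hccpos : pos = cc
      · subst hccpos
        have hpos0 : 0 < pos := by omega
        have hi : i = (pos-1)/2 := by omega
        rw [getD_set_ne _ _ _ _ _ (show pos ≠ i by omega), getD_set_self _ _ _ _ hpos, hi]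
        exact P2 hpos0
      · rw [getD_set_ne _ _ _ _ _ hipos,
            getD_set_ne _ _ _ _ _ hccpos]
        exact P1 i cc hrel hcc (fun e => hipos e.symm) (fun e => hccpos e.symm)

lemma siftdown_isHeap (h : List (Int × Nat)) (item : Int × Nat) (pos : Nat)
    (hpos : pos < h.length)
    (P1 : ∀ i c, (c = 2*i+1 ∨ c = 2*i+2) → c < h.length → i ≠ pos → c ≠ pos →
        pLe (h.getD i (0,0)) (h.getD c (0,0)))
    (P2 : 0 < pos → pLe (h.getD ((pos-1)/2) (0,0)) item)
    (P3 : 0 < pos → ∀ c, (c = 2*pos+1 ∨ c = 2*pos+2) → c < h.length →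
        pLe (h.getD ((pos-1)/2) (0,0)) (h.getD c (0,0))) :
    IsHeap (siftdown h item pos) :=
  siftdown_isHeap_aux h.length h item pos (by omega) hpos P1 P2 P3

-- ---- scatter folds ----
lemma scatter_group : ∀ (pairs : List (Int × Nat)) (cs : List (List Int)) (t : Nat),
    t < cs.length →
    (pairs.foldl (fun cs p => cs.set p.2 (cs.getD p.2 [] ++ [p.1])) cs).getD t []
      = cs.getD t [] ++ (pairs.filter (fun p => p.2 == t)).map Prod.fst := by
  intro pairs
  induction pairs with
  | nil => intro cs t _; simp
  | cons p rest ih =>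
    intro cs t ht
    rw [List.foldl_cons, ih _ t (by simpa using ht)]
    by_cases hpt : p.2 = t
    · subst hpt
      rw [getD_set_self _ _ _ _ ht]
      simp [List.filter_cons]
    · rw [getD_set_ne _ _ _ _ _ hpt]
      have hb : (p.2 == t) = false := by simpa using hpt
      simp [List.filter_cons, hb]

lemma scatter_group_len : ∀ (pairs : List (Int × Nat)) (cs : List (List Int)),
    (pairs.foldl (fun cs p => cs.set p.2 (cs.getD p.2 [] ++ [p.1])) cs).length = cs.length := by
  intro pairs
  induction pairs with
  | nil => intro cs; rfl
  | cons p rest ih => intro cs; rw [List.foldl_cons, ih]; simp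

lemma scatter_cargas (f : Nat → Int) : ∀ (hp : List (Int × Nat)) (cg : List Int) (t : Nat),
    t < cg.length → (∀ p ∈ hp, p.1 = f p.2) →
    (hp.foldl (fun cg p => cg.set p.2 p.1) cg).getD t 0
      = if t ∈ hp.map Prod.snd then f t else cg.getD t 0 := by
  intro hp
  induction hp with
  | nil => intro cg t _ _; simp
  | cons p rest ih =>
    intro cg t ht hf
    rw [List.foldl_cons, ih _ t (by simpa using ht) (fun q hq => hf q (by simp [hq]))]
    by_cases hpt : p.2 = t
    · subst hpt
      have hv : (cg.set p.2 p.1).getD p.2 0 = p.1 := getD_set_self _ _ _ _ ht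
      have hfp : p.1 = f p.2 := hf p (by simp)
      have hR : p.2 ∈ (p :: rest).map Prod.snd := by simp
      rw [if_pos hR]
      split
      · rfl
      · rw [hv, hfp]
    · rw [getD_set_ne _ _ _ _ _ hpt]
      have hne : ¬ t = p.2 := fun hh => hpt hh.symm
      have hiff : (t ∈ (p :: rest).map Prod.snd) ↔ (t ∈ rest.map Prod.snd) := by simp [hne]
      rw [if_congr hiff rfl rfl]

lemma scatter_cargas_len : ∀ (hp : List (Int × Nat)) (cg : List Int),
    (hp.foldl (fun cg p => cg.set p.2 p.1) cg).length = cg.length := by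
  intro hp
  induction hp with
  | nil => intro cg; rfl
  | cons p rest ih => intro cg; rw [List.foldl_cons, ih]; simp

-- ---- erasing the root's pair from the indexed-loads list ----
lemma erase_map_range (g : Nat → Int × Nat) (k j : Nat) (hsnd : ∀ t, (g t).2 = t) (hj : j < k) :
    ((List.range k).map g).erase (g j)
      = (List.range j).map g ++ (List.range' (j+1) (k-j-1)).map g := by
  obtain ⟨m, hm⟩ : ∃ m, k = j + (m + 1) := ⟨k - j - 1, by omega⟩
  subst hm
  have hk1 : j + (m + 1) - j - 1 = m := by omega
  rw [hk1]
  have hsplit : List.range (j+(m+1)) = List.range j ++ j :: List.range' (j+1) m := by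
    rw [List.range_eq_range', List.range_eq_range']
    have h1 : List.range' 0 j ++ List.range' (0+1*j) (m+1) = List.range' 0 (j+(m+1)) :=
      List.range'_append
    rw [show 0+1*j = j by omega] at h1
    rw [← h1, List.range'_succ]
  have hnotmem : g j ∉ (List.range j).map g := by
    intro hmem
    obtain ⟨t, htmem, hteq⟩ := List.mem_map.mp hmem
    have ht : t = j := by rw [← hsnd t, hteq, hsnd j]
    simp only [List.mem_range] at htmem
    omega
  rw [hsplit, List.map_append, List.map_cons,
      List.erase_append_right _ hnotmem, List.erase_cons_head]

lemma heap_le_mem {h : List (Int × Nat)} (hh : IsHeap h) {x : Int × Nat} (hx : x ∈ h) :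
    pLe (h.getD 0 (0,0)) x := by
  obtain ⟨n, hn, rfl⟩ := List.mem_iff_getElem.mp hx
  have := root_min hh n hn
  rwa [List.getD_eq_getElem _ _ hn] at this

-- ---- the central loop correspondence ----
lemma loop_equiv (k : Nat) (hk : 0 < k) : ∀ (rem : List Int) (cs : List (List Int))
    (heap : List (Int × Nat)) (dest : List Nat),
    cs.length = k →
    heap.Perm ((List.range k).map (fun t => (pySum (cs.getD t []), t))) →
    IsHeap heap →
    ∃ extra : List Nat,
      rem.foldl stepB (heap, dest)
          = ((rem.foldl stepB (heap, dest)).1, dest ++ extra)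
      ∧ (rem.foldl stepB (heap, dest)).1.Perm
          ((List.range k).map (fun t => (pySum ((rem.foldl stepA cs).getD t []), t)))
      ∧ IsHeap (rem.foldl stepB (heap, dest)).1
      ∧ extra.length = rem.length
      ∧ (rem.foldl stepA cs).length = k
      ∧ ∀ t, t < k → (rem.foldl stepA cs).getD t []
          = cs.getD t [] ++ ((rem.zip extra).filter (fun p => p.2 == t)).map Prod.fst := by
  intro rem
  induction rem with
  | nil =>
    intro cs heap dest hlen hperm hheap
    exact ⟨[], by simp, by simpa using hperm, hheap, rfl, hlen, by intro t _; simp⟩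
  | cons rota rem' ih =>
    intro cs heap dest hlen hperm hheap
    have hheaplen : heap.length = k := by simpa using hperm.length_eq
    obtain ⟨hd, tl, rfl⟩ : ∃ hd tl, heap = hd :: tl := by
      cases heap with
      | nil => simp at hheaplen; omega
      | cons a b => exact ⟨a, b, rfl⟩
    have hmem : hd ∈ ((List.range k).map (fun t => (pySum (cs.getD t []), t))) :=
      hperm.mem_iff.mp (by simp)
    obtain ⟨j, hjr, hjeq⟩ := List.mem_map.mp hmem
    subst hjeq
    have hjk : j < k := List.mem_range.mp hjr
    have hjlen : j < cs.length := by omega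
    have hmaplen : (cs.map pySum).length = k := by simp [hlen]
    have hargmin : pyArgmin (cs.map pySum) = j := by
      refine pyArgmin_eq_of _ j
        (by intro e; rw [e] at hmaplen; simp at hmaplen; omega) (by omega) ?_
      intro t ht
      have htk : t < k := by omega
      have htcs : t < cs.length := by omega
      have hmem2 : (pySum (cs.getD t []), t) ∈ ((pySum (cs.getD j []), j) :: tl) :=
        hperm.mem_iff.mpr (List.mem_map.mpr ⟨t, List.mem_range.mpr htk, rfl⟩)
      have hle := heap_le_mem hheap hmem2
      rw [List.getD_cons_zero] at hle
      rw [getD_map_pySum _ _ htcs, getD_map_pySum _ _ hjlen]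
      unfold pLe at hle
      simpa using hle
    have hstepA : stepA cs rota = cs.set j (cs.getD j [] ++ [rota]) := by
      simp only [stepA]
      rw [hargmin]
    have hsB : stepB ((pySum (cs.getD j []), j) :: tl, dest) rota
        = (siftdown ((pySum (cs.getD j []), j) :: tl) ((pySum (cs.getD j [])) + rota, j) 0,
           dest ++ [j]) := rfl
    have hf'j : (pySum ((stepA cs rota).getD j []), j) = ((pySum (cs.getD j [])) + rota, j) := by
      rw [hstepA, getD_set_self _ _ _ _ hjlen, pySum_append]
    have hperm1 : (siftdown ((pySum (cs.getD j []), j) :: tl) ((pySum (cs.getD j [])) + rota, j) 0).Perm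
        ((List.range k).map (fun t => (pySum ((stepA cs rota).getD t []), t))) := by
      refine (siftdown_perm _ _ 0 (by simp)).trans ?_
      rw [List.set_cons_zero, List.cons_perm_iff_perm_erase]
      constructor
      · exact List.mem_map.mpr ⟨j, List.mem_range.mpr hjk, hf'j⟩
      · have htl := (List.cons_perm_iff_perm_erase.mp hperm).2
        have he1 := erase_map_range (fun t => (pySum (cs.getD t []), t)) k j (fun t => rfl) hjk
        have he2 := erase_map_range (fun t => (pySum ((stepA cs rota).getD t []), t)) k j
          (fun t => rfl) hjk
        rw [← hf'j, he2]
        rw [he1] at htl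
        have hc1 : (List.range j).map (fun t => (pySum ((stepA cs rota).getD t []), t))
            = (List.range j).map (fun t => (pySum (cs.getD t []), t)) := by
          refine List.map_congr_left ?_
          intro t htm
          have htj : t < j := List.mem_range.mp htm
          rw [hstepA, getD_set_ne _ _ _ _ _ (by omega : j ≠ t)]
        have hc2 : (List.range' (j+1) (k-j-1)).map (fun t => (pySum ((stepA cs rota).getD t []), t))
            = (List.range' (j+1) (k-j-1)).map (fun t => (pySum (cs.getD t []), t)) := by
          refine List.map_congr_left ?_
          intro t htm
          have htj : j+1 ≤ t := (List.mem_range'_1.mp htm).1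
          rw [hstepA, getD_set_ne _ _ _ _ _ (by omega : j ≠ t)]
        rw [hc1, hc2]
        exact htl
    have hheap1 : IsHeap (siftdown ((pySum (cs.getD j []), j) :: tl)
        ((pySum (cs.getD j [])) + rota, j) 0) := by
      refine siftdown_isHeap _ _ 0 (by simp) ?_
        (fun h0 => absurd h0 (lt_irrefl 0)) (fun h0 => absurd h0 (lt_irrefl 0))
      intro i c hrel hc _ _
      exact hheap i c hrel hc
    obtain ⟨extra, hB1, hB2, hB3, hB4, hB5, hB6⟩ :=
      ih (stepA cs rota) _ (dest ++ [j]) (by rw [hstepA]; simp [hlen]) hperm1 hheap1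
    refine ⟨j :: extra, ?_, ?_, ?_, by simp [hB4], by simpa using hB5, ?_⟩
    · rw [List.foldl_cons, hsB, hB1]
      simp
    · rw [List.foldl_cons, hsB]
      rw [show (rota :: rem').foldl stepA cs = rem'.foldl stepA (stepA cs rota) from rfl]
      exact hB2
    · rw [List.foldl_cons, hsB]
      exact hB3
    · intro t ht
      rw [show (rota :: rem').foldl stepA cs = rem'.foldl stepA (stepA cs rota) from rfl]
      rw [hB6 t ht, List.zip_cons_cons, List.filter_cons]
      by_cases hjt : j = t
      · subst hjt
        rw [hstepA, getD_set_self _ _ _ _ hjlen]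
        simp
      · rw [hstepA, getD_set_ne _ _ _ _ _ hjt]
        have hb : ((rota, j).2 == t) = false := by simpa using hjt
        simp [hb]

-- ===== VERDICT (by name: the statement is the Claim_ definition above) =====
lemma getD_replicate_nil (k t : Nat) : (List.replicate k ([] : List Int)).getD t [] = [] := by
  rcases Nat.lt_or_ge t k with h | h
  · rw [List.getD_eq_getElem _ _ (by simpa using h)]
    simp
  · rw [List.getD_eq_default _ _ (by simpa using h)]

theorem distribuir_rotas_guloso_spec : Claim_equal_distribuir_rotas_guloso := by
  intro rotas num_caminhoes _ hpre
  have hk : 0 < num_caminhoes.toNat := by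
    unfold Pre_distribuir_rotas_guloso at hpre; omega
  unfold Spec_distribuir_rotas_guloso distribuir_rotas_guloso distribuir_rotas_guloso_alt
  dsimp only
  set k := num_caminhoes.toNat with hkdef
  have hperm0 : ((List.range k).map (fun t => ((0:Int), t))).Perm
      ((List.range k).map (fun t => (pySum ((List.replicate k ([]:List Int)).getD t []), t))) := by
    have hcong : ∀ t ∈ List.range k,
        ((0:Int), t) = (pySum ((List.replicate k ([]:List Int)).getD t []), t) := by
      intro t _
      rw [getD_replicate_nil]
      rfl
    rw [List.map_congr_left hcong]
  have hheap0 : IsHeap ((List.range k).map (fun t => ((0:Int), t))) := by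
    intro i c hrel hc
    rw [List.length_map, List.length_range] at hc
    have hik : i < k := by omega
    have e1 : ((List.range k).map (fun t => ((0:Int), t))).getD i (0,0) = (0, i) := by
      rw [List.getD_eq_getElem _ _ (by simp; omega), List.getElem_map, List.getElem_range]
    have e2 : ((List.range k).map (fun t => ((0:Int), t))).getD c (0,0) = (0, c) := by
      rw [List.getD_eq_getElem _ _ (by simp; omega), List.getElem_map, List.getElem_range]
    rw [e1, e2]
    unfold pLe
    simp
    omega
  obtain ⟨extra, h1, h2, h3, h4, h5, h6⟩ :=
    loop_equiv k hk rotas (List.replicate k ([] : List Int))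
      ((List.range k).map (fun t => ((0:Int), t))) [] (by simp) hperm0 hheap0
  set A := rotas.foldl stepA (List.replicate k ([] : List Int)) with hAdef
  set st := rotas.foldl stepB ((List.range k).map (fun t => ((0:Int), t)), []) with hstdef
  have hdest : st.2 = extra := by rw [h1]; rfl
  -- first components: the scatter-grouped trucks equal A's trucks
  have hgrouplen : ((rotas.zip st.2).foldl
      (fun cs p => cs.set p.2 (cs.getD p.2 [] ++ [p.1])) (List.replicate k ([] : List Int))).length
      = k := by rw [scatter_group_len]; simp
  have hfirst : A = (rotas.zip st.2).foldl
      (fun cs p => cs.set p.2 (cs.getD p.2 [] ++ [p.1])) (List.replicate k ([] : List Int)) := by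
    apply List.ext_getElem (by rw [hgrouplen, h5])
    intro i hi hi'
    have hik : i < k := by omega
    rw [← List.getD_eq_getElem A [] hi, ← List.getD_eq_getElem _ [] hi']
    rw [scatter_group _ _ i (by simpa using hik), hdest, h6 i hik, getD_replicate_nil]
  -- loads: the scatter-filled cargas equal A's per-truck sums
  have hcargas : st.1.foldl (fun cg p => cg.set p.2 p.1) (List.replicate k (0 : Int))
      = A.map pySum := by
    have hf : ∀ p ∈ st.1, p.1 = (fun t => pySum (A.getD t [])) p.2 := by
      intro p hp
      obtain ⟨t, _, hteq⟩ := List.mem_map.mp (h2.mem_iff.mp hp)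
      rw [← hteq]
    apply List.ext_getElem (by rw [scatter_cargas_len]; simp [h5])
    intro i hi hi'
    have hik : i < k := by
      rw [scatter_cargas_len] at hi
      simpa using hi
    rw [← List.getD_eq_getElem _ 0 hi, ← List.getD_eq_getElem _ 0 hi']
    rw [scatter_cargas (fun t => pySum (A.getD t [])) st.1 _ i (by simpa using hik) hf]
    have hmem : i ∈ st.1.map Prod.snd :=
      List.mem_map.mpr ⟨(pySum (A.getD i []), i),
        h2.mem_iff.mpr (List.mem_map.mpr ⟨i, List.mem_range.mpr hik, rfl⟩), rfl⟩
    rw [if_pos hmem, getD_map_pySum _ _ (by omega)]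
  exact Prod.ext hfirst (by rw [hcargas])
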